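-- pv_equiv track=rewrite | github.com/VolcharaVasiliy/risu-zai-proxy-archive | scripts/get-google-ai-studio-web-creds.py | js_string_end
-- ===== SOURCE A (Python) =====
-- def js_string_end(text: str, quote_index: int) -> int:
--     quote = text[quote_index]
--     escape = False
--     for index in range(quote_index + 1, len(text)):
--         char = text[index]
--         if escape:
--             escape = False
--         elif char == "\\":
--             escape = True
--         elif char == quote:
--             return index
--     return -1
-- ===== SOURCE B (Python) =====
-- def js_string_end(text: str, quote_index: int) -> int:
--     quote = text[quote_index]
--     if quote == "\\":
--         # a backslash always escapes the next character, so it can never close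
--         return -1
--     start = quote_index + 1
--     pos = text.find(quote, start)
--     while pos != -1:
--         # the candidate closes iff the run of backslashes just before it is even
--         k = pos
--         while k > start and text[k - 1] == "\\":
--             k -= 1
--         if (pos - k) % 2 == 0:
--             return pos
--         pos = text.find(quote, pos + 1)
--     return -1
-- ===== Notes on version B (the rewrite author's own statement) =====
-- stated objective: alternative
-- what changed: Instead of A's per-character scan with an escape flag, B jumps directly between occurrences of the quote character with str.find and accepts the first one preceded by an even run of backslashes (counted backwards), with an up-front early return when the opening quote is itself a backslash.
-- outside the precondition, e.g. on js_string_end('ab', -2): A returns 0, B returns -1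
import Mathlib
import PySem

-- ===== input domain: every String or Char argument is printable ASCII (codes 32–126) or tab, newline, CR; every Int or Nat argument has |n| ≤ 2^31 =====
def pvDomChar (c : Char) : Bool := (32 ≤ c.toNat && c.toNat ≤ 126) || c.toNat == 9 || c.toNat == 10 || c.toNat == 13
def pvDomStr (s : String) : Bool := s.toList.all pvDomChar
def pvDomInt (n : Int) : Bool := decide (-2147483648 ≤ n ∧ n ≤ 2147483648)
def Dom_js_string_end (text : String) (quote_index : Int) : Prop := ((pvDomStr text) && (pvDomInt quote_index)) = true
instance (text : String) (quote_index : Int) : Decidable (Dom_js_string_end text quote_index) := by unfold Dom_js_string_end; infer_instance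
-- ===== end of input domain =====

-- B replaces A's escape-flag scan by jumping between quote occurrences (str.find) and testing the
-- parity of the backslash run before each candidate; equal on Pre_ (nonnegative quote_index).

-- ===== PORT A =====
-- the for-loop of A: list of indices, escape flag as state, early return on the closing quote
def jsLoopA (cs : List Char) (quote : Char) : List Int → Bool → Int
  | [], _ => -1
  | i :: rest, esc =>
    match PySem.List.pyGet? cs i with
    | none => -1  -- IndexError: unreachable, every index of the range is in bounds under Pre_
    | some c =>
      if esc then jsLoopA cs quote rest false
      else if c = '\\' then jsLoopA cs quote rest true
      else if c = quote then i
      else jsLoopA cs quote rest false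

def js_string_end (text : String) (quote_index : Int) : Int :=
  match PySem.List.pyGet? text.toList quote_index with
  | none => -1  -- IndexError in Python: excluded by Pre_
  | some quote => jsLoopA text.toList quote (PySem.List.pyRange (quote_index + 1) (text.toList.length : Int) 1) false

-- ===== PORT B =====
-- inner while of B: walk k back over the backslash run immediately before the candidate
def runStart (cs : List Char) (startv : Int) (k : Int) : Int :=
  if h : startv < k ∧ PySem.List.pyGet? cs (k - 1) = some '\\' then runStart cs startv (k - 1) else k
termination_by (k - startv).toNat
decreasing_by omega

-- termination fact cited by jsLoopB's decreasing_by (proved self-contained, hence above the claim):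
-- an index found by str.find lies in [s, len)
theorem findQ_bounds (cs : List Char) (q : Char) (s : Int)
    (h : 0 ≤ PySem.Chars.findFrom cs [q] s none) :
    s < PySem.Chars.findFrom cs [q] s none + 1 ∧
      PySem.Chars.findFrom cs [q] s none < (cs.length : Int) := by
  have hgo : ∀ (t : List Char) (k : Nat), PySem.Chars.find.go [q] t k = -1 ∨
      ((k : Int) ≤ PySem.Chars.find.go [q] t k ∧
        PySem.Chars.find.go [q] t k < (k : Int) + (t.length : Int)) := by
    intro t
    induction t with
    | nil => intro k; simp [PySem.Chars.find.go]
    | cons c t ih =>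
      intro k
      rw [PySem.Chars.find.go]
      by_cases hp : [q].isPrefixOf (c :: t)
      · rw [if_pos hp]; right
        constructor
        · exact le_refl _
        · simp only [List.length_cons]; push_cast; omega
      · rw [if_neg hp]
        rcases ih (k+1) with h' | h'
        · left; exact h'
        · right
          simp only [List.length_cons]
          push_cast at h' ⊢
          omega
  have hfind : ∀ (m : Nat), PySem.Chars.find (List.drop m cs) [q] = -1 ∨
      (0 ≤ PySem.Chars.find (List.drop m cs) [q] ∧
        (m : Int) + PySem.Chars.find (List.drop m cs) [q] < (cs.length : Int)) := by
    intro m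
    rcases hgo (List.drop m cs) 0 with h' | h'
    · left
      unfold PySem.Chars.find
      exact h'
    · right
      unfold PySem.Chars.find
      rw [List.length_drop] at h'
      push_cast at h' ⊢
      omega
  unfold PySem.Chars.findFrom at h ⊢
  dsimp only at h ⊢
  rw [Int.toNat_natCast, List.take_length] at h ⊢
  have hb0 := hfind ((0:Int).toNat)
  have hb1 := hfind ((s + (cs.length : Int)).toNat)
  have hb2 := hfind (s.toNat)
  split_ifs at h ⊢ <;> omega

-- outer while of B: pos runs over quote occurrences; the 'pos != -1' test is the 0 ≤ r guard
def jsLoopB (cs : List Char) (startv : Int) (q : Char) (pos : Int) : Int :=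
  let k := runStart cs startv pos
  if PySem.Int.mod (pos - k) 2 = 0 then pos
  else
    let r := PySem.Chars.findFrom cs [q] (pos + 1) none
    if h : 0 ≤ r then jsLoopB cs startv q r else -1
termination_by ((cs.length : Int) - pos).toNat
decreasing_by
  have := findQ_bounds cs q (pos + 1) h
  omega

def js_string_end_alt (text : String) (quote_index : Int) : Int :=
  match PySem.List.pyGet? text.toList quote_index with
  | none => -1  -- IndexError in Python: excluded by Pre_
  | some quote =>
    if quote = '\\' then -1
    else
      let startv := quote_index + 1
      let pos := PySem.Chars.findFrom text.toList [quote] startv none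
      if 0 ≤ pos then jsLoopB text.toList startv quote pos else -1

-- ===== PRECONDITION & SPEC =====
-- Pre_ excludes (besides the IndexError region) negative quote_index, on which A still returns:
-- there range(quote_index+1, len) mixes wrapped negative reads with a rescan of the whole string —
-- an unspecified corner no caller exercises, where B's scan-from-the-opening-quote is as defensible.
def Pre_js_string_end (text : String) (quote_index : Int) : Prop :=
  0 ≤ quote_index ∧ quote_index < (text.toList.length : Int)
instance (text : String) (quote_index : Int) : Decidable (Pre_js_string_end text quote_index) := by unfold Pre_js_string_end; infer_instance

def pvWitness_js_string_end : String × Int := ("\"a\\\"b\"", 0)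

def Spec_js_string_end (text : String) (quote_index : Int) (out : Int) : Prop := out = js_string_end_alt text quote_index
instance (text : String) (quote_index : Int) (out : Int) : Decidable (Spec_js_string_end text quote_index out) := by unfold Spec_js_string_end; infer_instance

-- ===== CLAIM (what is proved, stated in full; the proofs are below) =====
def Claim_equal_js_string_end : Prop := ∀ (text : String) (quote_index : Int), Dom_js_string_end text quote_index → Pre_js_string_end text quote_index → Spec_js_string_end text quote_index (js_string_end text quote_index)

-- ===== LEMMAS AND PROOFS =====

theorem goBound (q : Char) (t : List Char) : ∀ (k : Nat),
    PySem.Chars.find.go [q] t k = -1 ∨ (k : Int) ≤ PySem.Chars.find.go [q] t k := by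
  induction t with
  | nil => intro k; simp [PySem.Chars.find.go]
  | cons c t ih =>
    intro k
    rw [PySem.Chars.find.go]
    by_cases hp : [q].isPrefixOf (c :: t)
    · rw [if_pos hp]; right; rfl
    · rw [if_neg hp]
      rcases ih (k+1) with h | h
      · left; exact h
      · right; omega

theorem goShift (q : Char) (t : List Char) : ∀ (k : Nat),
    PySem.Chars.find.go [q] t k =
      if PySem.Chars.find.go [q] t 0 = -1 then -1 else PySem.Chars.find.go [q] t 0 + k := by
  induction t with
  | nil => intro k; simp [PySem.Chars.find.go]
  | cons c t ih =>
    intro k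
    by_cases hp : [q].isPrefixOf (c :: t)
    · simp [PySem.Chars.find.go, hp]
    · rw [PySem.Chars.find.go, PySem.Chars.find.go, if_neg hp, if_neg hp]
      rw [ih (k+1), ih 1]
      have hb := goBound q t 0
      push_cast
      split_ifs with h1 h2 h2 <;> omega

theorem find_nilQ (q : Char) : PySem.Chars.find [] [q] = -1 := by
  simp [PySem.Chars.find, PySem.Chars.find.go]

theorem find_consQ (q c : Char) (t : List Char) :
    PySem.Chars.find (c :: t) [q] =
      if c = q then 0
      else if PySem.Chars.find t [q] = -1 then -1 else PySem.Chars.find t [q] + 1 := by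
  unfold PySem.Chars.find
  rw [PySem.Chars.find.go]
  have hpre : ([q].isPrefixOf (c :: t)) = (c == q) := by
    simp [List.isPrefixOf, BEq.comm]
  rw [hpre]
  by_cases h : c = q
  · simp [h]
  · rw [if_neg (by simpa using h), if_neg h]
    rw [goShift q t 1]
    norm_num

theorem findQ_reduce (cs : List Char) (q : Char) (s : Int) (h0 : 0 ≤ s) :
    PySem.Chars.findFrom cs [q] s none =
      (if (cs.length : Int) < s then -1
       else if PySem.Chars.find (List.drop s.toNat cs) [q] = -1 then -1
       else s + PySem.Chars.find (List.drop s.toNat cs) [q]) := by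
  unfold PySem.Chars.findFrom
  dsimp only
  rw [if_neg (by omega : ¬ s < 0)]
  by_cases hlt : (cs.length : Int) < s
  · rw [if_pos hlt, if_pos hlt]
  · rw [if_neg hlt, if_neg hlt]
    have hlen : (cs.length : Int).toNat = cs.length := by omega
    rw [hlen, List.take_length]

theorem findQ_oob (cs : List Char) (q : Char) (s : Int) (h0 : 0 ≤ s) (h : (cs.length : Int) ≤ s) :
    PySem.Chars.findFrom cs [q] s none = -1 := by
  rw [findQ_reduce cs q s h0]
  by_cases hlt : (cs.length : Int) < s
  · rw [if_pos hlt]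
  · rw [if_neg hlt]
    rw [List.drop_eq_nil_of_le (by omega), find_nilQ]
    norm_num

theorem getQ (cs : List Char) (s : Int) (c : Char) (h0 : 0 ≤ s) (hsn : s.toNat < cs.length)
    (hc : PySem.List.pyGet? cs s = some c) : cs[s.toNat] = c := by
  rw [PySem.List.pyGet?_of_nonneg cs h0] at hc
  simpa [List.getElem?_eq_getElem hsn] using hc

theorem findQ_hit (cs : List Char) (q : Char) (s : Int) (h0 : 0 ≤ s) (h1 : s < (cs.length : Int))
    (hc : PySem.List.pyGet? cs s = some q) :
    PySem.Chars.findFrom cs [q] s none = s := by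
  rw [findQ_reduce cs q s h0, if_neg (by omega)]
  have hsn : s.toNat < cs.length := by omega
  rw [List.drop_eq_getElem_cons hsn, getQ cs s q h0 hsn hc, find_consQ, if_pos rfl]
  norm_num

theorem findQ_miss (cs : List Char) (q : Char) (s : Int) (c : Char) (h0 : 0 ≤ s)
    (h1 : s < (cs.length : Int)) (hc : PySem.List.pyGet? cs s = some c) (hne : c ≠ q) :
    PySem.Chars.findFrom cs [q] s none = PySem.Chars.findFrom cs [q] (s + 1) none := by
  rw [findQ_reduce cs q s h0, if_neg (by omega)]
  rw [findQ_reduce cs q (s+1) (by omega)]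
  have hsn : s.toNat < cs.length := by omega
  have hs1 : (s+1).toNat = s.toNat + 1 := by omega
  rw [List.drop_eq_getElem_cons hsn, getQ cs s c h0 hsn hc, find_consQ, if_neg hne, hs1]
  by_cases he : (cs.length : Int) < s + 1
  · rw [if_pos he, List.drop_eq_nil_of_le (by omega), find_nilQ]
    norm_num
  · rw [if_neg he]
    have hb : PySem.Chars.find (List.drop (s.toNat + 1) cs) [q] = -1 ∨
        0 ≤ PySem.Chars.find (List.drop (s.toNat + 1) cs) [q] := by
      simpa [PySem.Chars.find] using goBound q (List.drop (s.toNat + 1) cs) 0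
    split_ifs <;> omega

theorem runStart_self (cs : List Char) (st : Int) : runStart cs st st = st := by
  rw [runStart]; simp

theorem runStart_le (cs : List Char) (st : Int) : ∀ (n : Nat) (k : Int), (k - st).toNat = n →
    runStart cs st k ≤ k := by
  intro n
  induction n using Nat.strong_induction_on with
  | _ n ih =>
    intro k hn
    rw [runStart]
    split_ifs with h
    · have := ih ((k - 1 - st).toNat) (by omega) (k - 1) rfl
      omega
    · omega

theorem runStart_ge (cs : List Char) (st : Int) : ∀ (n : Nat) (k : Int), (k - st).toNat = n →
    st ≤ k → st ≤ runStart cs st k := by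
  intro n
  induction n using Nat.strong_induction_on with
  | _ n ih =>
    intro k hn hk
    rw [runStart]
    split_ifs with h
    · exact ih ((k - 1 - st).toNat) (by omega) (k - 1) rfl (by omega)
    · omega

theorem runStart_succ_bs (cs : List Char) (st s : Int) (h : st ≤ s)
    (hc : PySem.List.pyGet? cs s = some '\\') :
    runStart cs st (s + 1) = runStart cs st s := by
  rw [runStart]; simp only [show s + 1 - 1 = s from by ring]
  rw [dif_pos ⟨by omega, hc⟩]

theorem runStart_succ_nbs (cs : List Char) (st s : Int)
    (hc : PySem.List.pyGet? cs s ≠ some '\\') :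
    runStart cs st (s + 1) = s + 1 := by
  rw [runStart]; simp only [show s + 1 - 1 = s from by ring]
  rw [dif_neg (by rintro ⟨-, h⟩; exact hc h)]

-- A with a backslash quote never returns: the backslash branch shadows the quote branch
theorem loopA_backslash (cs : List Char) : ∀ (n : Nat) (s : Int) (b : Bool),
    ((cs.length : Int) - s).toNat = n →
    jsLoopA cs '\\' (PySem.List.pyRange s (cs.length : Int) 1) b = -1 := by
  intro n
  induction n using Nat.strong_induction_on with
  | _ n ih =>
    intro s b hn
    by_cases hlt : s < (cs.length : Int)
    · rw [PySem.List.pyRange_one_cons hlt]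
      have ihs := fun b => ih (((cs.length : Int) - (s + 1)).toNat) (by omega) (s + 1) b rfl
      cases hc : PySem.List.pyGet? cs s with
      | none => simp [jsLoopA, hc]
      | some c =>
        cases b with
        | true => simpa [jsLoopA, hc] using ihs false
        | false =>
          by_cases hbs : c = '\\'
          · simpa [jsLoopA, hc, hbs] using ihs true
          · simpa [jsLoopA, hc, hbs] using ihs false
    · rw [PySem.List.pyRange_one_eq_nil (by omega)]
      rfl

-- B's state after each candidate test, as a function of the scan position
def bAt (cs : List Char) (st : Int) (q : Char) (s : Int) : Int :=
  let r := PySem.Chars.findFrom cs [q] s none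
  if _h : 0 ≤ r then jsLoopB cs st q r else -1

-- the escape flag A carries at position s is the parity of the backslash run ending before s
def escAt (cs : List Char) (st s : Int) : Bool := decide ((s - runStart cs st s) % 2 = 1)

-- main correspondence: from any position s, A's flag scan equals B's candidate loop
theorem loop_agree (cs : List Char) (q : Char) (st : Int) (hq : q ≠ '\\') (hst : 0 ≤ st) :
    ∀ (n : Nat) (s : Int), ((cs.length : Int) - s).toNat = n → st ≤ s →
    jsLoopA cs q (PySem.List.pyRange s (cs.length : Int) 1) (escAt cs st s) = bAt cs st q s := by
  intro n
  induction n using Nat.strong_induction_on with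
  | _ n ih =>
    intro s hn hs
    by_cases hlt : s < (cs.length : Int)
    · have h0s : 0 ≤ s := by omega
      obtain ⟨c, hc⟩ : ∃ c, PySem.List.pyGet? cs s = some c := by
        cases h : PySem.List.pyGet? cs s with
        | none =>
          have := (PySem.List.pyGet?_eq_none_iff cs s).mp h
          exact absurd (by unfold PySem.Raise.InRange; omega) this
        | some c => exact ⟨c, rfl⟩
      rw [PySem.List.pyRange_one_cons hlt]
      have ihs := ih (((cs.length : Int) - (s + 1)).toNat) (by omega) (s + 1) rfl (by omega)
      have hle := runStart_le cs st ((s - st).toNat) s rfl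
      have hge := runStart_ge cs st ((s - st).toNat) s rfl hs
      by_cases hesc : (s - runStart cs st s) % 2 = 1
      · -- escape flag set: A skips this character unconditionally
        have hflag : escAt cs st s = true := by unfold escAt; simpa using hesc
        have hnext : escAt cs st (s + 1) = false := by
          unfold escAt
          by_cases hbs : c = '\\'
          · rw [runStart_succ_bs cs st s hs (hbs ▸ hc)]
            simp only [decide_eq_false_iff_not]
            omega
          · rw [runStart_succ_nbs cs st s (by rw [hc]; simp [hbs])]
            simp
        have hA : jsLoopA cs q (s :: PySem.List.pyRange (s+1) (cs.length : Int) 1) (escAt cs st s)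
            = bAt cs st q (s + 1) := by
          rw [hflag]
          rw [hnext] at ihs
          simpa [jsLoopA, hc] using ihs
        rw [hA]
        by_cases hcq : c = q
        · -- candidate with odd run: B rejects it and moves on
          subst hcq
          unfold bAt
          rw [findQ_hit cs c s h0s hlt hc]
          rw [dif_pos h0s]
          rw [jsLoopB]
          have hcond : ¬ PySem.Int.mod (s - runStart cs st s) 2 = 0 := by
            rw [PySem.Int.mod_eq_emod_of_pos (by omega : (0:Int) < 2)]
            omega
          rw [if_neg hcond]
        · unfold bAt
          rw [findQ_miss cs q s c h0s hlt hc hcq]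
      · -- escape flag clear
        have hflag : escAt cs st s = false := by unfold escAt; simpa using hesc
        rw [hflag]
        by_cases hbs : c = '\\'
        · -- backslash starts an escape; it is not the quote
          subst hbs
          have hnext : escAt cs st (s + 1) = true := by
            unfold escAt
            rw [runStart_succ_bs cs st s hs hc]
            simp only [decide_eq_true_eq]
            omega
          have hA : jsLoopA cs q (s :: PySem.List.pyRange (s+1) (cs.length : Int) 1) false
              = bAt cs st q (s + 1) := by
            rw [hnext] at ihs
            simpa [jsLoopA, hc] using ihs
          rw [hA]
          unfold bAt
          rw [findQ_miss cs q s '\\' h0s hlt hc (fun h => hq h.symm)]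
        · by_cases hcq : c = q
          · -- unescaped quote: both sides return s
            subst hcq
            have hA : jsLoopA cs c (s :: PySem.List.pyRange (s+1) (cs.length : Int) 1) false = s := by
              simp [jsLoopA, hc, hbs]
            rw [hA]
            unfold bAt
            rw [findQ_hit cs c s h0s hlt hc]
            rw [dif_pos h0s]
            rw [jsLoopB]
            have hcond : PySem.Int.mod (s - runStart cs st s) 2 = 0 := by
              rw [PySem.Int.mod_eq_emod_of_pos (by omega : (0:Int) < 2)]
              omega
            rw [if_pos hcond]
          · -- ordinary character: both sides step to s+1
            have hnext : escAt cs st (s + 1) = false := by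
              unfold escAt
              rw [runStart_succ_nbs cs st s (by rw [hc]; simp [hbs])]
              simp
            have hA : jsLoopA cs q (s :: PySem.List.pyRange (s+1) (cs.length : Int) 1) false
                = bAt cs st q (s + 1) := by
              rw [hnext] at ihs
              simpa [jsLoopA, hc, hbs, hcq] using ihs
            rw [hA]
            unfold bAt
            rw [findQ_miss cs q s c h0s hlt hc hcq]
    · rw [PySem.List.pyRange_one_eq_nil (by omega)]
      unfold bAt
      rw [findQ_oob cs q s (by omega) (by omega)]
      norm_num
      rfl

-- ===== VERDICT (by name: the statement is the Claim_ definition above) =====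
theorem js_string_end_spec : Claim_equal_js_string_end := by
  intro text quote_index _ hpre
  obtain ⟨h0, h1⟩ := hpre
  unfold Spec_js_string_end js_string_end js_string_end_alt
  obtain ⟨quote, hq⟩ : ∃ c, PySem.List.pyGet? text.toList quote_index = some c := by
    cases h : PySem.List.pyGet? text.toList quote_index with
    | none =>
      have := (PySem.List.pyGet?_eq_none_iff text.toList quote_index).mp h
      exact absurd (by unfold PySem.Raise.InRange; omega) this
    | some c => exact ⟨c, rfl⟩
  rw [hq]
  dsimp only
  by_cases hbs : quote = '\\'
  · subst hbs
    rw [if_pos rfl]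
    exact loopA_backslash text.toList _ (quote_index + 1) false rfl
  · rw [if_neg hbs]
    have hmain := loop_agree text.toList quote (quote_index + 1) hbs (by omega)
      (((text.toList.length : Int) - (quote_index + 1)).toNat) (quote_index + 1) rfl (by omega)
    rw [show escAt text.toList (quote_index + 1) (quote_index + 1) = false from by
      unfold escAt; rw [runStart_self]; simp] at hmain
    rw [hmain]
    unfold bAt
    rfl
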